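-- pv_equiv track=rewrite | github.com/seoul01groupD/2nd | 0729 study/서울_1반_이준영/problem07.py | calculate_days_to_fill_tank
-- ===== SOURCE A (Python) =====
-- def calculate_days_to_fill_tank(tank_capacity, fill_amount, evaporation_amount):
--     pass
--     # 여기에 코드를 작성하여 함수를 완성합니다.
--     counting=1 # 걸리는 일수
--     amount=0 # 현재 물탱크의 물의 양
--     while True:
--         amount+=fill_amount
--         if amount>=tank_capacity:  # 낮에 넣어서 물탱크 다 채운 경우
--             break
--         amount-=evaporation_amount # 물이 증발함
--         counting+=1 # 하루가 지남
--     return counting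
-- ===== SOURCE B (Python) =====
-- def calculate_days_to_fill_tank(tank_capacity, fill_amount, evaporation_amount):
--     # Closed form: day 1 fills fill_amount; each further day adds net = fill - evap.
--     if fill_amount >= tank_capacity:
--         return 1
--     net = fill_amount - evaporation_amount
--     # extra days = ceil((tank_capacity - fill_amount) / net)
--     return -(-(tank_capacity - fill_amount) // net) + 1
-- ===== Notes on version B (the rewrite author's own statement) =====
-- stated objective: simpler
-- what changed: Replaced the day-by-day simulation loop with a closed-form expression: 1 if the first fill already reaches capacity, else ceil((cap-fill)/(fill-evap))+1.
import Mathlib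
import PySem

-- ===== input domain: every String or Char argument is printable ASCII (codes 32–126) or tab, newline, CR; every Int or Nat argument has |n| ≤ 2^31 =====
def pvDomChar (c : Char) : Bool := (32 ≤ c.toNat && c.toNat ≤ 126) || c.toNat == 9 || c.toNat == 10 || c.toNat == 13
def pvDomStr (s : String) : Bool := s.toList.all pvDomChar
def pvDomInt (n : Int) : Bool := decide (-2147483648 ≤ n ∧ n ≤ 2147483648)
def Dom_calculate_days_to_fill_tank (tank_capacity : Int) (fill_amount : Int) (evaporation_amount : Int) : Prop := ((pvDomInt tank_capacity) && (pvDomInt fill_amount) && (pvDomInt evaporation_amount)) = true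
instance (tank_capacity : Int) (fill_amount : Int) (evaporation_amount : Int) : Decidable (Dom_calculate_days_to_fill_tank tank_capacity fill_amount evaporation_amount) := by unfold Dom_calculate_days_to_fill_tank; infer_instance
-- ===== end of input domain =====

-- B replaces A's day-by-day simulation loop with a closed-form ceiling-division formula (simpler).


-- ===== PORT A =====
-- A's 'while True' loop; a Nat fuel makes it total in Lean (Pre_ guarantees the fuel
-- chosen below is more than enough, so on Pre_ the fuel case is never the one that returns).
def pvLoopA (tank_capacity fill_amount evaporation_amount : Int) :
    Nat → Int → Int → Int
  | 0, counting, _ => counting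
  | fuel + 1, counting, amount =>
    let amount := amount + fill_amount
    if amount ≥ tank_capacity then counting
    else pvLoopA tank_capacity fill_amount evaporation_amount fuel (counting + 1) (amount - evaporation_amount)

def calculate_days_to_fill_tank (tank_capacity : Int) (fill_amount : Int) (evaporation_amount : Int) : Int :=
  pvLoopA tank_capacity fill_amount evaporation_amount
    ((tank_capacity - fill_amount).toNat + 2) 1 0

-- ===== PORT B =====
def calculate_days_to_fill_tank_alt (tank_capacity : Int) (fill_amount : Int) (evaporation_amount : Int) : Int :=
  if fill_amount ≥ tank_capacity then 1
  else
    let net := fill_amount - evaporation_amount;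
    -(PySem.Int.floordiv (-(tank_capacity - fill_amount)) net) + 1

-- ===== PRECONDITION & SPEC =====
-- Pre_ excludes exactly the inputs on which A's while-loop never terminates (first fill
-- below capacity and no positive net gain per day): A returns no value there.
def Pre_calculate_days_to_fill_tank (tank_capacity : Int) (fill_amount : Int) (evaporation_amount : Int) : Prop :=
  fill_amount ≥ tank_capacity ∨ evaporation_amount < fill_amount

instance (tank_capacity : Int) (fill_amount : Int) (evaporation_amount : Int) : Decidable (Pre_calculate_days_to_fill_tank tank_capacity fill_amount evaporation_amount) := by unfold Pre_calculate_days_to_fill_tank; infer_instance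

def pvWitness_calculate_days_to_fill_tank : Int × Int × Int := (10, 3, 1)

def Spec_calculate_days_to_fill_tank (tank_capacity : Int) (fill_amount : Int) (evaporation_amount : Int) (out : Int) : Prop := out = calculate_days_to_fill_tank_alt tank_capacity fill_amount evaporation_amount
instance (tank_capacity : Int) (fill_amount : Int) (evaporation_amount : Int) (out : Int) : Decidable (Spec_calculate_days_to_fill_tank tank_capacity fill_amount evaporation_amount out) := by unfold Spec_calculate_days_to_fill_tank; infer_instance

-- ===== CLAIM (what is proved, stated in full; the proofs are below) =====
def Claim_equal_calculate_days_to_fill_tank : Prop := ∀ (tank_capacity : Int) (fill_amount : Int) (evaporation_amount : Int), Dom_calculate_days_to_fill_tank tank_capacity fill_amount evaporation_amount → Pre_calculate_days_to_fill_tank tank_capacity fill_amount evaporation_amount → Spec_calculate_days_to_fill_tank tank_capacity fill_amount evaporation_amount (calculate_days_to_fill_tank tank_capacity fill_amount evaporation_amount)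

-- ===== LEMMAS AND PROOFS =====

-- ceiling division -((-x) // b) is characterised by its bracket
theorem pv_ceil_bounds (x b : Int) (hb : 0 < b) :
    (-(PySem.Int.floordiv (-x) b) - 1) * b < x ∧ x ≤ -(PySem.Int.floordiv (-x) b) * b := by
  have := (PySem.Int.neg_floordiv_neg_eq_iff_of_pos (a := x) (b := b)
    (q := -(PySem.Int.floordiv (-x) b)) hb).mp rfl
  exact this

theorem pv_ceil_unique (x b t : Int) (hb : 0 < b)
    (h1 : (t - 1) * b < x) (h2 : x ≤ t * b) :
    -(PySem.Int.floordiv (-x) b) = t :=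
  (PySem.Int.neg_floordiv_neg_eq_iff_of_pos hb).mpr ⟨h1, h2⟩

-- loop invariant: with positive net gain and enough fuel, the loop returns
-- counting + (ceil((cap - amount - fill)/net) - 1) extra steps beyond the first hit
theorem pvLoopA_eq (cap fill evap : Int) (hnet : 0 < fill - evap) :
    ∀ (fuel : Nat) (c a : Int), a + fill < cap →
      -(PySem.Int.floordiv (-(cap - a - fill)) (fill - evap)) + 1 ≤ (fuel : Int) →
      pvLoopA cap fill evap fuel c a
        = c + -(PySem.Int.floordiv (-(cap - a - fill)) (fill - evap)) := by
  intro fuel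
  induction fuel with
  | zero =>
    intro c a hlt hfuel
    exfalso
    obtain ⟨h1, h2⟩ := pv_ceil_bounds (cap - a - fill) (fill - evap) hnet
    set t := -(PySem.Int.floordiv (-(cap - a - fill)) (fill - evap)) with ht
    -- t ≥ 1 since x > 0
    have hx : 0 < cap - a - fill := by omega
    have htpos : 1 ≤ t := by nlinarith
    omega
  | succ n ih =>
    intro c a hlt hfuel
    obtain ⟨h1, h2⟩ := pv_ceil_bounds (cap - a - fill) (fill - evap) hnet
    set t := -(PySem.Int.floordiv (-(cap - a - fill)) (fill - evap)) with ht
    have hx : 0 < cap - a - fill := by omega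
    have htpos : 1 ≤ t := by nlinarith
    rw [pvLoopA]
    simp only [ge_iff_le, if_neg (by omega : ¬ cap ≤ a + fill)]
    by_cases h2cap : (a + fill - evap) + fill ≥ cap
    · -- next iteration hits capacity: t = 1
      have htone : t = 1 := by
        have : cap - a - fill ≤ 1 * (fill - evap) := by omega
        have h0 : (1 - 1) * (fill - evap) < cap - a - fill := by omega
        have := pv_ceil_unique (cap - a - fill) (fill - evap) 1 hnet h0 this
        omega
      have hn : ∃ m, n = m + 1 := by
        rcases n with _ | m
        · exfalso; omega
        · exact ⟨m, rfl⟩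
      obtain ⟨m, rfl⟩ := hn
      rw [pvLoopA]
      simp only [ge_iff_le, if_pos (by omega : cap ≤ (a + fill - evap) + fill)]
      omega
    · -- recurse: the ceiling drops by exactly one
      have ht' : -(PySem.Int.floordiv (-(cap - (a + fill - evap) - fill)) (fill - evap)) = t - 1 := by
        apply pv_ceil_unique _ _ _ hnet
        · have : (t - 1 - 1) * (fill - evap) = (t - 1) * (fill - evap) - (fill - evap) := by ring
          rw [this]; omega
        · have : (t - 1) * (fill - evap) = t * (fill - evap) - (fill - evap) := by ring
          omega
      rw [ih (c + 1) (a + fill - evap) (by omega) (by rw [ht']; push_cast at hfuel ⊢; omega)]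
      rw [ht']; ring

theorem calculate_days_to_fill_tank_spec_aux (cap fill evap : Int)
    (hpre : fill ≥ cap ∨ evap < fill) :
    calculate_days_to_fill_tank cap fill evap = calculate_days_to_fill_tank_alt cap fill evap := by
  unfold calculate_days_to_fill_tank calculate_days_to_fill_tank_alt
  by_cases hge : fill ≥ cap
  · rw [if_pos hge, pvLoopA]
    simp only [ge_iff_le, zero_add]
    rw [if_pos (by omega : cap ≤ fill)]
  · rw [if_neg hge]
    have hnet : 0 < fill - evap := by omega
    have hlt : (0 : Int) + fill < cap := by omega
    obtain ⟨h1, h2⟩ := pv_ceil_bounds (cap - 0 - fill) (fill - evap) hnet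
    set t := -(PySem.Int.floordiv (-(cap - 0 - fill)) (fill - evap)) with ht
    have hx : 0 < cap - 0 - fill := by omega
    have htpos : 1 ≤ t := by nlinarith
    -- t ≤ cap - fill, so the chosen fuel suffices
    have htle : t ≤ cap - fill := by nlinarith
    have hfuel : t + 1 ≤ (((cap - fill).toNat + 2 : Nat) : Int) := by
      push_cast; omega
    rw [pvLoopA_eq cap fill evap hnet _ 1 0 hlt hfuel]
    simp only [show cap - 0 - fill = cap - fill from by ring]
    ring

-- ===== VERDICT (by name: the statement is the Claim_ definition above) =====
theorem calculate_days_to_fill_tank_spec : Claim_equal_calculate_days_to_fill_tank := by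
  intro cap fill evap _ hpre
  exact calculate_days_to_fill_tank_spec_aux cap fill evap hpre
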